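-- pv_equiv track=rewrite | github.com/IlariaCattaneo/Algorithms-Data-Structures | Algo_exercises/Esercizi_preparazione_esame/ex_267.py | algo_y
-- ===== SOURCE A (Python) =====
-- def algo_y(A, r, c):
--     for i in range(r*c):
--         for j in range(i+1, r*c):
--             if A[i] != A[j]:
--                 a = (i-1)//c
--                 b = (j-1)//c
--                 if a == b or a == b-1:
--                     if i - a*c == j - b*c or i - a*c == j - b*c + 1 or i - a*c == j - b*c -1:
--                         return True
--     return False
-- ===== SOURCE B (Python) =====
-- def algo_y(A, r, c):
--     n = r * c
--     for i in range(n):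
--         for j in (i + 1, i + c - 1, i + c, i + c + 1):
--             if i < j < n and A[i] != A[j]:
--                 a = (i - 1) // c
--                 b = (j - 1) // c
--                 if a == b or a == b - 1:
--                     if i - a*c in (j - b*c, j - b*c + 1, j - b*c - 1):
--                         return True
--     return False
-- ===== Notes on version B (the rewrite author's own statement) =====
-- stated objective: faster
-- what changed: B replaces A's scan over all later cells j for every i by a constant-size candidate window {i+1, i+c-1, i+c, i+c+1} per cell, which provably contains every j A's arithmetic adjacency test can accept.
-- outside the precondition, e.g. on algo_y([1, 2], 2, 2): A returns True, B returns True
import Mathlib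
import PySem

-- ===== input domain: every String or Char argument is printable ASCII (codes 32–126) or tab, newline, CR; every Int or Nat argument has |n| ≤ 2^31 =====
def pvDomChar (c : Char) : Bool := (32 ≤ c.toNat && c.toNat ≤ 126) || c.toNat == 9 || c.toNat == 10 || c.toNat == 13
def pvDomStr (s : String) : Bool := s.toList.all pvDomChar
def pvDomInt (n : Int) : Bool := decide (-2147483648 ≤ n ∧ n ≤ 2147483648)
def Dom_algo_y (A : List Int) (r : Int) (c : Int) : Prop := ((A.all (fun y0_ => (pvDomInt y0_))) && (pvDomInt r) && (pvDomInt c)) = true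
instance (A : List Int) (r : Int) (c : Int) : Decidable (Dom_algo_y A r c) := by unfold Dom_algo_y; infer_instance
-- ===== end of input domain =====

-- B checks, for each cell i, only the constant-size candidate window
-- {i+1, i+c-1, i+c, i+c+1} instead of scanning all later cells j: O(r*c) vs A's O((r*c)^2).
-- Equivalence is over the return value; neither program mutates its arguments.

-- ===== PORT A =====
-- the body of Python's innermost 'if' cascade (textually identical in A and B)
def algoYHit (A : List Int) (c : Int) (i j : Int) : Bool :=
  decide (PySem.List.pyGetD A i 0 ≠ PySem.List.pyGetD A j 0) &&
    (let a := PySem.Int.floordiv (i-1) c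
     let b := PySem.Int.floordiv (j-1) c
     decide (a = b ∨ a = b - 1) &&
       decide (i - a*c = j - b*c ∨ i - a*c = j - b*c + 1 ∨ i - a*c = j - b*c - 1))

-- inner 'for j in range(i+1, r*c)' with early return; fuel = remaining iteration count
def algoYInner (A : List Int) (c n i : Int) : Nat → Int → Bool
  | 0, _ => false
  | fuel+1, j =>
      if j < n then
        if algoYHit A c i j then true else algoYInner A c n i fuel (j+1)
      else false

-- outer 'for i in range(r*c)' with early return; fuel = remaining iteration count
def algoYOuter (A : List Int) (c n : Int) : Nat → Int → Bool
  | 0, _ => false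
  | fuel+1, i =>
      if i < n then
        if algoYInner A c n i ((n - (i+1)).toNat) (i+1) then true
        else algoYOuter A c n fuel (i+1)
      else false

def algo_y (A : List Int) (r : Int) (c : Int) : Bool :=
  algoYOuter A c (r*c) ((r*c).toNat) 0

-- ===== PORT B =====
-- outer 'for i in range(n)' with early return; the inner loop is over the 4 candidates
def algoYAltOuter (A : List Int) (c n : Int) : Nat → Int → Bool
  | 0, _ => false
  | fuel+1, i =>
      if i < n then
        if [i + 1, i + c - 1, i + c, i + c + 1].any (fun j =>
             decide (i < j ∧ j < n) && algoYHit A c i j) then true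
        else algoYAltOuter A c n fuel (i+1)
      else false

def algo_y_alt (A : List Int) (r : Int) (c : Int) : Bool :=
  algoYAltOuter A c (r*c) ((r*c).toNat) 0

-- ===== PRECONDITION & SPEC =====
-- Pre_ excludes the inputs on which A's unguarded A[i]/A[j] indexing can raise IndexError
-- (r*c exceeding len(A)); on a few such inputs A happens to return True before reaching a
-- bad index, and those are excluded with it.
def Pre_algo_y (A : List Int) (r : Int) (c : Int) : Prop := r * c ≤ A.length
instance (A : List Int) (r : Int) (c : Int) : Decidable (Pre_algo_y A r c) := by unfold Pre_algo_y; infer_instance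
def pvWitness_algo_y : List Int × Int × Int := ([1, 1, 1, 2], 2, 2)

def Spec_algo_y (A : List Int) (r : Int) (c : Int) (out : Bool) : Prop := out = algo_y_alt A r c
instance (A : List Int) (r : Int) (c : Int) (out : Bool) : Decidable (Spec_algo_y A r c out) := by unfold Spec_algo_y; infer_instance

-- ===== CLAIM (what is proved, stated in full; the proofs are below) =====
def Claim_equal_algo_y : Prop := ∀ (A : List Int) (r : Int) (c : Int), Dom_algo_y A r c → Pre_algo_y A r c → Spec_algo_y A r c (algo_y A r c)

-- ===== LEMMAS AND PROOFS =====

-- Any pair (i, j) with i < j passing A's row/column arithmetic has j in B's window.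
theorem algo_y_window (i j c : Int) (hij : i < j)
    (hab : PySem.Int.floordiv (i-1) c = PySem.Int.floordiv (j-1) c ∨
           PySem.Int.floordiv (i-1) c = PySem.Int.floordiv (j-1) c - 1)
    (hcol : i - (PySem.Int.floordiv (i-1) c) * c = j - (PySem.Int.floordiv (j-1) c) * c ∨
            i - (PySem.Int.floordiv (i-1) c) * c = j - (PySem.Int.floordiv (j-1) c) * c + 1 ∨
            i - (PySem.Int.floordiv (i-1) c) * c = j - (PySem.Int.floordiv (j-1) c) * c - 1) :
    j = i + 1 ∨ j = i + c - 1 ∨ j = i + c ∨ j = i + c + 1 := by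
  set a := PySem.Int.floordiv (i-1) c with ha
  set b := PySem.Int.floordiv (j-1) c with hb
  rcases hab with hab | hab
  · have h : a * c = b * c := by rw [hab]
    generalize a * c = t at hcol h
    generalize b * c = u at hcol h
    omega
  · have h : b * c = a * c + c := by
      have : b = a + 1 := by omega
      rw [this]; ring
    generalize a * c = t at hcol h
    generalize b * c = u at hcol h
    omega

theorem algoYInner_iff (A : List Int) (c n i : Int) :
    ∀ (fuel : Nat) (j : Int), (n - j).toNat ≤ fuel →
      (algoYInner A c n i fuel j = true ↔ ∃ k : Int, j ≤ k ∧ k < n ∧ algoYHit A c i k = true) := by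
  intro fuel
  induction fuel with
  | zero =>
    intro j hf
    simp only [algoYInner, Bool.false_eq_true, false_iff]
    rintro ⟨k, hk1, hk2, _⟩; omega
  | succ fuel ih =>
    intro j hf
    simp only [algoYInner]
    by_cases h1 : j < n
    · rw [if_pos h1]
      by_cases hb : algoYHit A c i j = true
      · rw [if_pos hb]
        exact ⟨fun _ => ⟨j, le_refl j, h1, hb⟩, fun _ => rfl⟩
      · rw [if_neg hb, ih (j+1) (by omega)]
        constructor
        · rintro ⟨k, hk1, hk2, hk3⟩; exact ⟨k, by omega, hk2, hk3⟩
        · rintro ⟨k, hk1, hk2, hk3⟩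
          refine ⟨k, ?_, hk2, hk3⟩
          rcases eq_or_lt_of_le hk1 with h | h
          · exact absurd (h ▸ hk3) hb
          · omega
    · rw [if_neg h1]
      simp only [Bool.false_eq_true, false_iff]
      rintro ⟨k, hk1, hk2, _⟩; omega

theorem algoYOuter_iff (A : List Int) (c n : Int) :
    ∀ (fuel : Nat) (i : Int), (n - i).toNat ≤ fuel →
      (algoYOuter A c n fuel i = true ↔
        ∃ x : Int, i ≤ x ∧ x < n ∧ ∃ k : Int, x < k ∧ k < n ∧ algoYHit A c x k = true) := by
  intro fuel
  induction fuel with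
  | zero =>
    intro i hf
    simp only [algoYOuter, Bool.false_eq_true, false_iff]
    rintro ⟨x, hx1, hx2, _⟩; omega
  | succ fuel ih =>
    intro i hf
    simp only [algoYOuter]
    by_cases h1 : i < n
    · rw [if_pos h1]
      by_cases hb : algoYInner A c n i ((n - (i+1)).toNat) (i+1) = true
      · rw [if_pos hb]
        rw [algoYInner_iff A c n i ((n - (i+1)).toNat) (i+1) (le_refl _)] at hb
        obtain ⟨k, hk1, hk2, hk3⟩ := hb
        exact ⟨fun _ => ⟨i, le_refl i, h1, k, by omega, hk2, hk3⟩, fun _ => rfl⟩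
      · rw [if_neg hb, ih (i+1) (by omega)]
        constructor
        · rintro ⟨x, hx1, hx2, hrest⟩; exact ⟨x, by omega, hx2, hrest⟩
        · rintro ⟨x, hx1, hx2, k, hk1, hk2, hk3⟩
          refine ⟨x, ?_, hx2, k, hk1, hk2, hk3⟩
          rcases eq_or_lt_of_le hx1 with h | h
          · subst h; exfalso; apply hb
            rw [algoYInner_iff A c n i ((n - (i+1)).toNat) (i+1) (le_refl _)]
            exact ⟨k, by omega, hk2, hk3⟩
          · omega
    · rw [if_neg h1]
      simp only [Bool.false_eq_true, false_iff]
      rintro ⟨x, hx1, hx2, _⟩; omega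

theorem algoYAltOuter_iff (A : List Int) (c n : Int) :
    ∀ (fuel : Nat) (i : Int), (n - i).toNat ≤ fuel →
      (algoYAltOuter A c n fuel i = true ↔
        ∃ x : Int, i ≤ x ∧ x < n ∧
          ∃ k ∈ [x + 1, x + c - 1, x + c, x + c + 1], x < k ∧ k < n ∧ algoYHit A c x k = true) := by
  intro fuel
  induction fuel with
  | zero =>
    intro i hf
    simp only [algoYAltOuter, Bool.false_eq_true, false_iff]
    rintro ⟨x, hx1, hx2, _⟩; omega
  | succ fuel ih =>
    intro i hf
    simp only [algoYAltOuter]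
    by_cases h1 : i < n
    · rw [if_pos h1]
      by_cases hb : ([i + 1, i + c - 1, i + c, i + c + 1].any (fun j =>
          decide (i < j ∧ j < n) && algoYHit A c i j)) = true
      · rw [if_pos hb]
        rw [List.any_eq_true] at hb
        obtain ⟨k, hkmem, hk⟩ := hb
        simp only [Bool.and_eq_true, decide_eq_true_eq] at hk
        exact ⟨fun _ => ⟨i, le_refl i, h1, k, hkmem, hk.1.1, hk.1.2, hk.2⟩, fun _ => rfl⟩
      · rw [if_neg hb, ih (i+1) (by omega)]
        constructor
        · rintro ⟨x, hx1, hx2, hrest⟩; exact ⟨x, by omega, hx2, hrest⟩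
        · rintro ⟨x, hx1, hx2, k, hkmem, hk1, hk2, hk3⟩
          refine ⟨x, ?_, hx2, k, hkmem, hk1, hk2, hk3⟩
          rcases eq_or_lt_of_le hx1 with h | h
          · exfalso; apply hb; rw [List.any_eq_true]
            subst h
            exact ⟨k, hkmem, by simp only [Bool.and_eq_true, decide_eq_true_eq]; exact ⟨⟨hk1, hk2⟩, hk3⟩⟩
          · omega
    · rw [if_neg h1]
      simp only [Bool.false_eq_true, false_iff]
      rintro ⟨x, hx1, hx2, _⟩; omega

theorem algo_y_spec : Claim_equal_algo_y := by
  intro A r c _ _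
  unfold Spec_algo_y algo_y algo_y_alt
  rw [Bool.eq_iff_iff,
    algoYOuter_iff A c (r*c) ((r*c).toNat) 0 (by omega),
    algoYAltOuter_iff A c (r*c) ((r*c).toNat) 0 (by omega)]
  constructor
  · rintro ⟨x, hx1, hx2, k, hk1, hk2, hk3⟩
    refine ⟨x, hx1, hx2, k, ?_, hk1, hk2, hk3⟩
    have hhit := hk3
    unfold algoYHit at hhit
    simp only [Bool.and_eq_true, decide_eq_true_eq] at hhit
    have := algo_y_window x k c hk1 hhit.2.1 hhit.2.2
    simp only [List.mem_cons, List.not_mem_nil, or_false]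
    tauto
  · rintro ⟨x, hx1, hx2, k, _, hk1, hk2, hk3⟩
    exact ⟨x, hx1, hx2, k, hk1, hk2, hk3⟩
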